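-- pv_equiv track=rewrite | github.com/pypi-data/pypi-mirror-321 | packages/vba-edit/vba_edit-0.3.0-py3-none-any.whl/vba_edit/office_vba.py | split_vba_content
-- ===== SOURCE A (Python) =====
-- from typing import Dict, Optional, Any, Tuple
--
-- def split_vba_content(content: str) -> Tuple[str, str]:
--     """Split VBA content into header and code sections.
--
--     Args:
--         content: Complete VBA component content
--
--     Returns:
--         Tuple of (header, code)
--
--     Note:
--         Only module-level attributes (VB_Name, VB_GlobalNameSpace, VB_Creatable,
--         VB_PredeclaredId, VB_Exposed) are considered part of the header.
--         Procedure-level attributes are considered part of the code.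
--     """
--     if not content.strip():
--         return "", ""
--
--     lines = content.splitlines()
--     last_attr_idx = -1
--
--     for i, line in enumerate(lines):
--         stripped = line.strip()
--         if stripped.startswith("Attribute VB_"):
--             last_attr_idx = i
--         elif last_attr_idx >= 0 and not stripped.startswith("Attribute VB_"):
--             break
--
--     if last_attr_idx == -1:
--         return "", content
--
--     header = "\n".join(lines[: last_attr_idx + 1])
--     code = "\n".join(lines[last_attr_idx + 1 :])
--
--     return header.strip(), code.strip()
-- ===== SOURCE B (Python) =====
-- def split_vba_content(content: str):
--     """Split VBA content into (header, code) at the first contiguous run of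
--     module-level 'Attribute VB_' lines."""
--     if not content.strip():
--         return "", ""
--     lines = content.splitlines()
--     idxs = [i for i, ln in enumerate(lines) if ln.strip().startswith("Attribute VB_")]
--     if not idxs:
--         return "", content
--     end = idxs[0]
--     for j in idxs[1:]:
--         if j != end + 1:
--             break
--         end = j
--     return "\n".join(lines[: end + 1]).strip(), "\n".join(lines[end + 1 :]).strip()
-- ===== Notes on version B (the rewrite author's own statement) =====
-- stated objective: alternative
-- what changed: A tracks a last_attr_idx/break state machine inside one enumerate loop; B first collects all attribute-line indices with a comprehension and then walks that index list to find the end of the first consecutive run.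
import Mathlib
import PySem

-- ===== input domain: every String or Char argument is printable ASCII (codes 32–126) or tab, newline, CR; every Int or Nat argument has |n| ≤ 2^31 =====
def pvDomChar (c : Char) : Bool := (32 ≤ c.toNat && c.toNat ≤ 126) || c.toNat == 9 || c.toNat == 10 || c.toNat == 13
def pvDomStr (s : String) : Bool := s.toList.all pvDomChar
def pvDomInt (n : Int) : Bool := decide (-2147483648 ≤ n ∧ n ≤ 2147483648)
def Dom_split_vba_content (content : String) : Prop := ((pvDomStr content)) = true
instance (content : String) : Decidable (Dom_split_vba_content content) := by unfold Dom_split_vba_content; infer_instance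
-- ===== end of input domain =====

-- B replaces A's single-loop last_attr_idx/break state machine by a comprehension that
-- collects the attribute-line indices and a scan of that index list for its first
-- consecutive run (objective: alternative decomposition, same cost).

-- ===== PORT A =====
-- the 'for i, line in enumerate(lines): … break' loop, state = last_attr_idx
def pvLoopA : List (Int × String) → Int → Int
  | [], acc => acc
  | (i, line) :: rest, acc =>
    let stripped := PySem.Str.strip line
    if PySem.Str.startswith stripped "Attribute VB_" then pvLoopA rest i
    else if acc ≥ 0 && !(PySem.Str.startswith stripped "Attribute VB_") then acc  -- break
    else pvLoopA rest acc

def split_vba_content (content : String) : String × String :=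
  if PySem.Str.strip content = "" then ("", "")
  else
    let lines := PySem.Str.splitlines content
    let lastAttrIdx := pvLoopA (PySem.List.enumerate lines) (-1)
    if lastAttrIdx = -1 then ("", content)
    else
      let header := PySem.Str.join "\n" (PySem.List.slice lines none (some (lastAttrIdx + 1)))
      let code := PySem.Str.join "\n" (PySem.List.slice lines (some (lastAttrIdx + 1)) none)
      (PySem.Str.strip header, PySem.Str.strip code)

-- ===== PORT B =====
-- 'for j in idxs[1:]: if j != end+1: break; end = j'
def pvRunEnd : List Int → Int → Int
  | [], e => e
  | j :: rest, e => if j ≠ e + 1 then e else pvRunEnd rest j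

def split_vba_content_alt (content : String) : String × String :=
  if PySem.Str.strip content = "" then ("", "")
  else
    let lines := PySem.Str.splitlines content
    let idxs := (PySem.List.enumerate lines).filterMap
      (fun p => if PySem.Str.startswith (PySem.Str.strip p.2) "Attribute VB_" then some p.1 else none)
    match idxs with
    | [] => ("", content)
    | j :: rest =>
      let e := pvRunEnd rest j
      (PySem.Str.strip (PySem.Str.join "\n" (PySem.List.slice lines none (some (e + 1)))),
       PySem.Str.strip (PySem.Str.join "\n" (PySem.List.slice lines (some (e + 1)) none)))

-- ===== PRECONDITION & SPEC =====
def Spec_split_vba_content (content : String) (out : String × String) : Prop := out = split_vba_content_alt content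
instance (content : String) (out : String × String) : Decidable (Spec_split_vba_content content out) := by unfold Spec_split_vba_content; infer_instance

-- ===== CLAIM (what is proved, stated in full; the proofs are below) =====
def Claim_equal_split_vba_content : Prop := ∀ (content : String), Dom_split_vba_content content → Spec_split_vba_content content (split_vba_content content)

-- ===== LEMMAS AND PROOFS =====

def pvIsAttr (line : String) : Bool := PySem.Str.startswith (PySem.Str.strip line) "Attribute VB_"

def pvFilt (ls : List String) (i : Int) : List Int :=
  (PySem.List.enumerate ls i).filterMap (fun p => if pvIsAttr p.2 then some p.1 else none)

theorem pvLoopA_cons (i : Int) (x : String) (rest : List (Int × String)) (acc : Int) :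
    pvLoopA ((i, x) :: rest) acc =
      (if pvIsAttr x then pvLoopA rest i
       else if acc ≥ 0 && !(pvIsAttr x) then acc
       else pvLoopA rest acc) := rfl

theorem pvFilt_cons (x : String) (ls : List String) (i : Int) :
    pvFilt (x :: ls) i = (if pvIsAttr x then [i] else []) ++ pvFilt ls (i + 1) := by
  unfold pvFilt
  rw [PySem.List.enumerate_cons, List.filterMap_cons]
  by_cases h : pvIsAttr x <;> simp [h]

theorem pvFilt_ge (ls : List String) (i : Int) : ∀ x ∈ pvFilt ls i, i ≤ x := by
  induction ls generalizing i with
  | nil => simp [pvFilt]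
  | cons x ls ih =>
    intro y hy
    rw [pvFilt_cons] at hy
    rcases List.mem_append.1 hy with h | h
    · split at h <;> simp_all
    · have := ih (i + 1) y h; omega

theorem pvRunEnd_ge (l : List Int) (e : Int) : e ≤ pvRunEnd l e := by
  induction l generalizing e with
  | nil => simp [pvRunEnd]
  | cons j rest ih =>
    simp only [pvRunEnd]
    split
    · omega
    · have := ih j; omega

-- phase 2: after the first attribute line (acc = k ≥ 0), A's loop equals B's run scan
theorem pvPhase2 (ls : List String) (k : Int) (hk : 0 ≤ k) :
    pvLoopA (PySem.List.enumerate ls (k + 1)) k = pvRunEnd (pvFilt ls (k + 1)) k := by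
  induction ls generalizing k with
  | nil => simp [pvFilt, pvRunEnd, pvLoopA]
  | cons x ls ih =>
    rw [PySem.List.enumerate_cons, pvFilt_cons, pvLoopA_cons]
    by_cases hx : pvIsAttr x
    · rw [if_pos hx, if_pos hx]
      simp only [List.cons_append, List.nil_append, pvRunEnd,
        if_neg (by omega : ¬ (k + 1 : Int) ≠ k + 1)]
      exact ih (k + 1) (by omega)
    · rw [if_neg hx, if_pos (by simp [hx]; omega), if_neg hx, List.nil_append]
      cases h : pvFilt ls (k + 1 + 1) with
      | nil => simp [pvRunEnd]
      | cons j rest =>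
        have hj : k + 1 + 1 ≤ j := pvFilt_ge ls (k + 1 + 1) j (by rw [h]; exact List.mem_cons_self ..)
        simp only [pvRunEnd, if_pos (by omega : j ≠ k + 1)]

-- phase 1: before any attribute line (acc = -1)
theorem pvPhase1 (ls : List String) (i : Int) (hi : 0 ≤ i) :
    pvLoopA (PySem.List.enumerate ls i) (-1) =
      match pvFilt ls i with
      | [] => -1
      | j :: rest => pvRunEnd rest j := by
  induction ls generalizing i with
  | nil => simp [pvFilt, pvLoopA]
  | cons x ls ih =>
    rw [PySem.List.enumerate_cons, pvFilt_cons, pvLoopA_cons]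
    by_cases hx : pvIsAttr x
    · rw [if_pos hx, if_pos hx, List.cons_append, List.nil_append]
      exact pvPhase2 ls i hi
    · rw [if_neg hx, if_neg (by simp), if_neg hx, List.nil_append]
      exact ih (i + 1) (by omega)
-- ===== VERDICT (by name: the statement is the Claim_ definition above) =====
theorem split_vba_content_spec : Claim_equal_split_vba_content := by
  intro content _
  unfold Spec_split_vba_content split_vba_content split_vba_content_alt
  by_cases hstrip : PySem.Str.strip content = ""
  · simp [hstrip]
  · simp only [if_neg hstrip]
    set lines := PySem.Str.splitlines content with hlines
    have hmain := pvPhase1 lines 0 le_rfl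
    have hfilt : (PySem.List.enumerate lines).filterMap
        (fun p => if PySem.Str.startswith (PySem.Str.strip p.2) "Attribute VB_" then some p.1 else none)
        = pvFilt lines 0 := rfl
    rw [hfilt]
    cases h : pvFilt lines 0 with
    | nil =>
      rw [h] at hmain
      rw [hmain]
      simp
    | cons j rest =>
      rw [h] at hmain
      have hj : (0 : Int) ≤ j := pvFilt_ge lines 0 j (by rw [h]; exact List.mem_cons_self ..)
      have hge : j ≤ pvRunEnd rest j := pvRunEnd_ge rest j
      rw [hmain]
      rw [if_neg (by omega : ¬ pvRunEnd rest j = -1)]
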